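-- pv_equiv track=rewrite | github.com/Steven9408/Algorithm_Study | SWEA/SSAFY/11_start/20210413/5185.py | hetax_to_binary
-- ===== SOURCE A (Python) =====
-- def hetax_to_binary(chr):
--     res = ''
--     if ord('0') <= ord(chr) <= ord('9'):
--         demi = ord(chr) - ord('0')
--     else:
--         demi = 10 + ord(chr) - ord('A')
--     for n in range(0,4):
--         res = str(demi%2) + res
--         demi //= 2
--     return res
-- ===== SOURCE B (Python) =====
-- _NIBBLE = ['0000', '0001', '0010', '0011', '0100', '0101', '0110', '0111',
--            '1000', '1001', '1010', '1011', '1100', '1101', '1110', '1111']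
--
-- def hetax_to_binary(chr):
--     o = ord(chr)
--     demi = o - 48 if 48 <= o <= 57 else o - 55
--     return _NIBBLE[demi % 16]
-- ===== Notes on version B (the rewrite author's own statement) =====
-- stated objective: alternative
-- what changed: The 4-iteration bit-extraction loop (repeated %2 and //=2 with string prepending) is replaced by a single indexed lookup into a precomputed 16-entry nibble table keyed by demi % 16, whose floor mod reproduces the loop's low-4-bit behaviour including negative demi.
import Mathlib
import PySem

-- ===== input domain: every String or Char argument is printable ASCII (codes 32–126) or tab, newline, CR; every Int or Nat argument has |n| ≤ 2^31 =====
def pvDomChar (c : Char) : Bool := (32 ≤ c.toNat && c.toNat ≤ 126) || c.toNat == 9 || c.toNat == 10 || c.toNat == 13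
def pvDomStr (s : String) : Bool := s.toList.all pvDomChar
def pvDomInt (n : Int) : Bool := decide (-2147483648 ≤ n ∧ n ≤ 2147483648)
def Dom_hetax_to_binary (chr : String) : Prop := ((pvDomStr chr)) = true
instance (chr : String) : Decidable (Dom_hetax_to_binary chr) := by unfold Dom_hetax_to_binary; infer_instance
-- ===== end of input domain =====

-- B replaces A's four-step %2 / //=2 bit loop with one lookup into a 16-entry nibble table keyed by demi % 16 (alternative, same cost).

-- ===== PORT A =====
-- loop body: res = str(demi % 2) + res; demi //= 2
def hetaxLoop (p : List Char × Int) (_ : Int) : List Char × Int :=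
  (PySem.Int.toChars (PySem.Int.mod p.2 2) ++ p.1, PySem.Int.floordiv p.2 2)

def hetax_to_binary (chr : String) : String :=
  match chr.toList with
  | [c] =>
      let demi : Int := if 48 ≤ (c.toNat : Int) ∧ (c.toNat : Int) ≤ 57
        then (c.toNat : Int) - 48
        else 10 + (c.toNat : Int) - 65
      String.ofList ((PySem.List.pyRange 0 4 1).foldl hetaxLoop ([], demi)).1
  | _ => ""  -- ord(chr) raises TypeError here; excluded by Pre_

-- ===== PORT B =====
def hetaxNibble : List String :=
  ["0000", "0001", "0010", "0011", "0100", "0101", "0110", "0111",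
   "1000", "1001", "1010", "1011", "1100", "1101", "1110", "1111"]

def hetax_to_binary_alt (chr : String) : String :=
  match chr.toList with
  | [] => ""           -- ord(chr) raises TypeError here; excluded by Pre_
  | c :: rest =>
      if rest.isEmpty then
        let o : Int := (c.toNat : Int)
        let demi : Int := if 48 ≤ o ∧ o ≤ 57 then o - 48 else o - 55
        PySem.List.pyGetD hetaxNibble (PySem.Int.mod demi 16) ""
      else ""          -- ord(chr) raises TypeError here; excluded by Pre_

-- ===== PRECONDITION & SPEC =====
-- Pre_: ord(chr) raises TypeError unless chr is a single character.
def Pre_hetax_to_binary (chr : String) : Prop := chr.toList.length = 1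
instance (chr : String) : Decidable (Pre_hetax_to_binary chr) := by unfold Pre_hetax_to_binary; infer_instance
def pvWitness_hetax_to_binary : String := "A"

def Spec_hetax_to_binary (chr : String) (out : String) : Prop := out = hetax_to_binary_alt chr
instance (chr : String) (out : String) : Decidable (Spec_hetax_to_binary chr out) := by unfold Spec_hetax_to_binary; infer_instance

-- ===== CLAIM (what is proved, stated in full; the proofs are below) =====
def Claim_equal_hetax_to_binary : Prop := ∀ (chr : String), Dom_hetax_to_binary chr → Pre_hetax_to_binary chr → Spec_hetax_to_binary chr (hetax_to_binary chr)

-- ===== LEMMAS AND PROOFS =====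

-- A's loop, unfolded over range(0,4)
lemma hetax_loop_unfold (d : Int) :
    ((PySem.List.pyRange 0 4 1).foldl hetaxLoop ([], d)).1 =
      PySem.Int.toChars (PySem.Int.mod (PySem.Int.floordiv (PySem.Int.floordiv (PySem.Int.floordiv d 2) 2) 2) 2) ++
      (PySem.Int.toChars (PySem.Int.mod (PySem.Int.floordiv (PySem.Int.floordiv d 2) 2) 2) ++
      (PySem.Int.toChars (PySem.Int.mod (PySem.Int.floordiv d 2) 2) ++
      (PySem.Int.toChars (PySem.Int.mod d 2) ++ []))) := rfl

-- each of the four low bits of d agrees with the corresponding bit of d % 16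
lemma hetax_mod16_bits (d : Int) :
    PySem.Int.mod d 2 = PySem.Int.mod (PySem.Int.mod d 16) 2 ∧
    PySem.Int.mod (PySem.Int.floordiv d 2) 2 =
      PySem.Int.mod (PySem.Int.floordiv (PySem.Int.mod d 16) 2) 2 ∧
    PySem.Int.mod (PySem.Int.floordiv (PySem.Int.floordiv d 2) 2) 2 =
      PySem.Int.mod (PySem.Int.floordiv (PySem.Int.floordiv (PySem.Int.mod d 16) 2) 2) 2 ∧
    PySem.Int.mod (PySem.Int.floordiv (PySem.Int.floordiv (PySem.Int.floordiv d 2) 2) 2) 2 =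
      PySem.Int.mod (PySem.Int.floordiv (PySem.Int.floordiv (PySem.Int.floordiv (PySem.Int.mod d 16) 2) 2) 2) 2 := by
  simp only [PySem.Int.mod_eq_emod_of_pos (show (0:Int) < 2 by norm_num),
    PySem.Int.mod_eq_emod_of_pos (show (0:Int) < 16 by norm_num),
    PySem.Int.floordiv_eq_ediv_of_pos (show (0:Int) < 2 by norm_num)]
  omega

-- the core equality: A's loop output equals the table entry at index d % 16
lemma hetax_core_eq (d : Int) :
    String.ofList ((PySem.List.pyRange 0 4 1).foldl hetaxLoop ([], d)).1 =
      PySem.List.pyGetD hetaxNibble (PySem.Int.mod d 16) "" := by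
  have h0 : 0 ≤ PySem.Int.mod d 16 := PySem.Int.mod_nonneg _ (by norm_num)
  have h1 : PySem.Int.mod d 16 < 16 := PySem.Int.mod_lt _ (by norm_num)
  have hmm : PySem.Int.mod (PySem.Int.mod d 16) 16 = PySem.Int.mod d 16 := by
    simp only [PySem.Int.mod_eq_emod_of_pos (show (0:Int) < 16 by norm_num)]
    omega
  obtain ⟨b0, b1, b2, b3⟩ := hetax_mod16_bits d
  rw [show (((PySem.List.pyRange 0 4 1).foldl hetaxLoop ([], d)).1 =
        ((PySem.List.pyRange 0 4 1).foldl hetaxLoop ([], PySem.Int.mod d 16)).1) from by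
      rw [hetax_loop_unfold d, hetax_loop_unfold (PySem.Int.mod d 16), b0, b1, b2, b3],
    ← hmm]
  generalize PySem.Int.mod d 16 = m at h0 h1
  interval_cases m <;> decide

-- ===== VERDICT (by name: the statement is the Claim_ definition above) =====
theorem hetax_to_binary_spec : Claim_equal_hetax_to_binary := by
  intro chr _ hpre
  obtain ⟨c, hc⟩ := List.length_eq_one_iff.mp hpre
  unfold Spec_hetax_to_binary hetax_to_binary hetax_to_binary_alt
  rw [hc]
  have : (10 : Int) + (c.toNat : Int) - 65 = (c.toNat : Int) - 55 := by ring
  simp only [this]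
  exact hetax_core_eq _
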